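-- pv_equiv track=rewrite | github.com/s4mdf0o1/TuxKatana | logs/compare_logs.py | trouver_positions_sequences
-- ===== SOURCE A (Python) =====
-- def trouver_positions_sequences(hex_list, sequences):
--     """Retourne un set des positions des séquences connues."""
--     positions = set()
--     for seq in sequences:
--         seq_len = len(seq)
--         for i in range(len(hex_list) - seq_len + 1):
--             if hex_list[i:i+seq_len] == seq:
--                 positions.update(range(i, i+seq_len))
--     return positions
-- ===== SOURCE B (Python) =====
-- def trouver_positions_sequences(hex_list, sequences):
--     """Retourne un set des positions des séquences connues."""
--     index = {}
--     for i, tok in enumerate(hex_list):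
--         index.setdefault(tok, []).append(i)
--     positions = set()
--     for seq in sequences:
--         if not seq:
--             continue
--         m = len(seq)
--         for i in index.get(seq[0], []):
--             if hex_list[i:i+m] == seq:
--                 positions.update(range(i, i+m))
--     return positions
-- ===== Notes on version B (the rewrite author's own statement) =====
-- stated objective: alternative
-- what changed: B builds an inverted index from token to its occurrence positions once, then for each sequence verifies only the candidate start positions of its first token, instead of A's full sliding-window scan of hex_list for every sequence.
import Mathlib
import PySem

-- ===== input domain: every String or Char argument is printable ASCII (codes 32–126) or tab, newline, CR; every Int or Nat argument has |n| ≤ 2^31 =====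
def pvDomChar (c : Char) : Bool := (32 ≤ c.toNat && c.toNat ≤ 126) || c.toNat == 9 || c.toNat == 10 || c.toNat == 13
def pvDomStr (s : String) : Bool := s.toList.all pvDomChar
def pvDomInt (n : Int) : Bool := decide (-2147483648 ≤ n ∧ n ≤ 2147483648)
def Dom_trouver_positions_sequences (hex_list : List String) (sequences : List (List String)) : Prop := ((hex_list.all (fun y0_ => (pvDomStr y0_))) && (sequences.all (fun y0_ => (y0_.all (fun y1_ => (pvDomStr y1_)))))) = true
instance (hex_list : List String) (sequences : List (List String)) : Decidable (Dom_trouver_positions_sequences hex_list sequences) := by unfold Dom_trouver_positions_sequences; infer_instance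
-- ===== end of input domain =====

-- ===== PORT A =====
-- One honest line: B replaces A's per-sequence full sliding scan by an inverted index
-- (token -> positions) built once, verifying only the candidate starts of each sequence's first token.
def trouver_positions_sequences (hex_list : List String) (sequences : List (List String)) : List Int :=
  sequences.foldl (fun positions seq =>
    let seq_len : Int := PySem.List.len seq
    (PySem.List.pyRange 0 (PySem.List.len hex_list - seq_len + 1) 1).foldl
      (fun positions i =>
        if PySem.List.slice hex_list (some i) (some (i + seq_len)) == seq then
          PySem.Set.update positions (PySem.List.pyRange i (i + seq_len) 1)
        else positions)
      positions)
    PySem.Set.empty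

-- ===== PORT B =====
def trouver_positions_sequences_alt (hex_list : List String) (sequences : List (List String)) : List Int :=
  let index : PySem.Dict String (List Int) :=
    (PySem.List.enumerate hex_list).foldl
      (fun d p => d.modify p.2 [] (fun l => l ++ [p.1])) PySem.Dict.empty
  sequences.foldl (fun positions seq =>
    match seq with
    | [] => positions
    | t :: _ =>
      let m : Int := PySem.List.len seq
      (index.getD t []).foldl
        (fun positions i =>
          if PySem.List.slice hex_list (some i) (some (i + m)) == seq then
            PySem.Set.update positions (PySem.List.pyRange i (i + m) 1)
          else positions)
        positions)
    PySem.Set.empty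

-- ===== PRECONDITION & SPEC =====
def Spec_trouver_positions_sequences (hex_list : List String) (sequences : List (List String)) (out : List Int) : Prop := out = trouver_positions_sequences_alt hex_list sequences
instance (hex_list : List String) (sequences : List (List String)) (out : List Int) : Decidable (Spec_trouver_positions_sequences hex_list sequences out) := by unfold Spec_trouver_positions_sequences; infer_instance

-- ===== CLAIM (what is proved, stated in full; the proofs are below) =====
def Claim_equal_trouver_positions_sequences : Prop := ∀ (hex_list : List String) (sequences : List (List String)), Dom_trouver_positions_sequences hex_list sequences → Spec_trouver_positions_sequences hex_list sequences (trouver_positions_sequences hex_list sequences)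

-- ===== LEMMAS AND PROOFS =====

theorem pv_match_facts (hex_list : List String) (t : String) (rest : List String) (k : Nat)
    (h : (PySem.List.slice hex_list (some (k : Int)) (some ((k : Int) + ((t :: rest).length : Int))) == (t :: rest)) = true) :
    k + (t :: rest).length ≤ hex_list.length ∧ hex_list.getD k "" = t := by
  rw [show ((t :: rest).length : Int) = ((t :: rest).length : Nat) from rfl] at h
  rw [PySem.List.slice_natCast_add] at h
  rw [beq_iff_eq] at h
  have hlen := congrArg List.length h
  rw [List.length_take, List.length_drop] at hlen
  have hk : k + (t :: rest).length ≤ hex_list.length := by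
    have hm : (t :: rest).length = rest.length + 1 := rfl
    have := Nat.min_le_left (t :: rest).length (hex_list.length - k)
    have := Nat.min_le_right (t :: rest).length (hex_list.length - k); omega
  refine ⟨hk, ?_⟩
  have h0 := congrArg (fun l => l[0]?) h
  simp [List.getElem?_drop] at h0
  simp [List.getD_eq_getElem?_getD, h0]

theorem pv_filterA (hex_list : List String) (t : String) (rest : List String) :
    (PySem.List.pyRange 0 ((hex_list.length : Int) - ((t :: rest).length : Int) + 1) 1).filter
        (fun i => PySem.List.slice hex_list (some i) (some (i + ((t :: rest).length : Int))) == (t :: rest))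
      = (PySem.List.pyRange 0 (hex_list.length : Int) 1).filter
        (fun i => PySem.List.slice hex_list (some i) (some (i + ((t :: rest).length : Int))) == (t :: rest)) := by
  by_cases hmn : ((hex_list.length : Int) - ((t :: rest).length : Int) + 1) ≤ 0
  · rw [PySem.List.pyRange_one_eq_nil hmn]
    symm
    simp only [List.filter_nil]
    rw [List.filter_eq_nil_iff]
    intro i hi hPi
    rw [PySem.List.mem_pyRange_one] at hi
    obtain ⟨hi0, hin⟩ := hi
    have hik : i = ((i.toNat : Nat) : Int) := by omega
    rw [hik] at hPi
    have := (pv_match_facts hex_list t rest _ hPi).1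
    omega
  · rw [PySem.List.pyRange_one_append 0 ((hex_list.length : Int) - ((t :: rest).length : Int) + 1) (hex_list.length : Int) (by omega) (by have : (t::rest).length = rest.length + 1 := rfl; omega)]
    rw [List.filter_append]
    have hnil : (PySem.List.pyRange ((hex_list.length : Int) - ((t :: rest).length : Int) + 1) (hex_list.length : Int) 1).filter
        (fun i => PySem.List.slice hex_list (some i) (some (i + ((t :: rest).length : Int))) == (t :: rest)) = [] := by
      rw [List.filter_eq_nil_iff]
      intro i hi hPi
      rw [PySem.List.mem_pyRange_one] at hi
      obtain ⟨hi0, hin⟩ := hi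
      have hik : i = ((i.toNat : Nat) : Int) := by omega
      rw [hik] at hPi
      have := (pv_match_facts hex_list t rest _ hPi).1
      omega
    rw [hnil, List.append_nil]

theorem pv_occ (hex_list : List String) (t : String) :
    (((PySem.List.enumerate hex_list).foldl
        (fun d p => d.modify p.2 [] (fun l => l ++ [p.1])) PySem.Dict.empty).getD t [])
      = (PySem.List.pyRange 0 (hex_list.length : Int) 1).filter
          (fun j => PySem.List.pyGetD hex_list j "" == t) := by
  have h1 : (PySem.List.enumerate hex_list).foldl
        (fun d p => d.modify p.2 [] (fun l => l ++ [p.1])) PySem.Dict.empty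
      = ((PySem.List.enumerate hex_list).map (fun p => (p.2, p.1))).foldl
        (fun d q => d.modify q.1 [] (fun l => l ++ [q.2])) PySem.Dict.empty := by
    rw [List.foldl_map]
  rw [h1, PySem.Dict.getD_foldl_modify_append]
  rw [PySem.List.enumerate_eq_map_pyRange hex_list ""]
  simp [List.filter_map, List.map_map, PySem.List.len_eq, Function.comp_def]

theorem pv_filterB (hex_list : List String) (t : String) (rest : List String) :
    ((((PySem.List.enumerate hex_list).foldl
        (fun d p => d.modify p.2 [] (fun l => l ++ [p.1])) PySem.Dict.empty).getD t [])).filter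
        (fun i => PySem.List.slice hex_list (some i) (some (i + ((t :: rest).length : Int))) == (t :: rest))
      = (PySem.List.pyRange 0 (hex_list.length : Int) 1).filter
        (fun i => PySem.List.slice hex_list (some i) (some (i + ((t :: rest).length : Int))) == (t :: rest)) := by
  rw [pv_occ, List.filter_filter]
  apply List.filter_congr
  intro i hi
  rw [PySem.List.mem_pyRange_one] at hi
  obtain ⟨hi0, hin⟩ := hi
  obtain ⟨k, rfl⟩ : ∃ k : Nat, i = (k : Int) := ⟨i.toNat, by omega⟩
  cases hPi : (PySem.List.slice hex_list (some (k : Int)) (some ((k : Int) + ((t :: rest).length : Int))) == (t :: rest)) with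
  | false => simp
  | true =>
    have hQ := (pv_match_facts hex_list t rest k hPi).2
    simp only [Bool.true_and]
    rw [PySem.List.pyGetD_natCast]
    simp only [beq_iff_eq, List.getD_eq_getElem?_getD] at hQ ⊢
    exact hQ

-- ===== VERDICT (by name: the statement is the Claim_ definition above) =====
theorem trouver_positions_sequences_spec : Claim_equal_trouver_positions_sequences := by
  intro hex_list sequences _
  unfold Spec_trouver_positions_sequences trouver_positions_sequences trouver_positions_sequences_alt
  apply PySem.List.foldl_congr_mem
  intro acc seq _
  cases seq with
  | nil =>
    simp only [PySem.List.len_eq]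
    refine Eq.trans (PySem.List.foldl_congr_mem _ _ (fun acc' _ => acc') acc ?_) (PySem.List.foldl_ignore _ _)
    intro acc' i _
    simp [PySem.List.pyRange_one_eq_nil (le_refl i), PySem.Set.update_nil]
  | cons t rest =>
    simp only [PySem.List.len_eq]
    rw [PySem.List.foldl_if_eq_foldl_filter, PySem.List.foldl_if_eq_foldl_filter]
    rw [pv_filterA, pv_filterB]
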